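-- pv_equiv track=rewrite | github.com/PeterHarlan/blind-75 | graphs.py | path_exists_bfs
-- ===== SOURCE A (Python) =====
-- def path_exists_bfs(matrix, start, end):
--     visited = [False] * len(matrix)
--     queue = [start]
--     visited[start] = True
--     while queue:
--         current = queue.pop(0)
--         if current == end:
--             return True
--         for i in range(len(matrix)):
--             if matrix[current][i] == 1 and not visited[i]:
--                 visited[i] = True
--                 queue.append(i)
--     return False
-- ===== SOURCE B (Python) =====
-- def path_exists_bfs(matrix, start, end):
--     if start == end:
--         return True
--     n = len(matrix)
--     reach = [False] * n
--     reach[start] = True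
--     changed = True
--     while changed:
--         changed = False
--         for u in range(n):
--             if reach[u]:
--                 for v in range(n):
--                     if matrix[u][v] == 1 and not reach[v]:
--                         reach[v] = True
--                         changed = True
--     return 0 <= end < n and reach[end]
-- ===== Notes on version B (the rewrite author's own statement) =====
-- stated objective: alternative
-- what changed: Replaced the explicit FIFO-queue BFS with a transitive-closure saturation: a reachability bit-array is repeatedly swept over the whole adjacency matrix until a sweep adds nothing, and the answer is read off the array; the start==end short-circuit is kept.
-- intended difference: On a well-formed matrix with an in-range negative start and end = start + len(matrix) (the nonnegative index of the start node itself), A returns False because it only ever compares the literal value start against end while marking index start+n visited, whereas B returns True, the intended answer since end names the very node the search starts from. — e.g. on path_exists_bfs([[0]], -1, 0): A returns false, B returns true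
-- outside the precondition, e.g. on path_exists_bfs([[0, 0], [0]], 0, 1): A returns False, B returns False; on path_exists_bfs([[]], 0, 0): A returns True, B returns True
import Mathlib
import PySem

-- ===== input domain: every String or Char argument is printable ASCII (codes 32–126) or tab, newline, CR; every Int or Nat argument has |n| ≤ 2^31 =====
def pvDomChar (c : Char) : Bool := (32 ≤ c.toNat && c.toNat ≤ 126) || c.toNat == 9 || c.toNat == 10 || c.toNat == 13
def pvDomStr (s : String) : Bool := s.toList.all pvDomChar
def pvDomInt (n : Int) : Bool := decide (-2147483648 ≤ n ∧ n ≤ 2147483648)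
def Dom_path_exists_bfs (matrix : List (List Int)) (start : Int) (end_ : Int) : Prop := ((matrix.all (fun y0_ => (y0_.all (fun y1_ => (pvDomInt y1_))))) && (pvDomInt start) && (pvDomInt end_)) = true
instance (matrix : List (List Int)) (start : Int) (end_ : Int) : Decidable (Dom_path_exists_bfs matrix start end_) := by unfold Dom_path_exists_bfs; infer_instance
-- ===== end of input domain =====

-- B replaces A's FIFO-queue BFS by whole-matrix saturation sweeps of a reachability
-- bit-array (alternative decomposition, similar cost); B additionally treats an in-range
-- negative start consistently with Python index wraparound (see D_ below).
-- A mutates no caller-visible state; equivalence is about the return value.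

-- ===== PORT A =====
-- inner 'for i in range(len(matrix))' body of A; state = (visited, queue-after-pop)
def pvBfsStep (matrix : List (List Int)) (current : Int)
    (st : List Bool × List Int) (i : Int) : List Bool × List Int :=
  if (PySem.List.pyGetD (PySem.List.pyGetD matrix current []) i 0 == 1)
      && !(PySem.List.pyGetD st.1 i false) then
    (PySem.List.pySetD st.1 i true, st.2 ++ [i])
  else st

-- A's 'while queue:' loop; fuel only makes it total (with fuel matrix.length + 2 the
-- 0 branch is never reached on inputs satisfying Pre_, proved in the lemmas below)
def pvBfsLoop (matrix : List (List Int)) (end_ : Int) :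
    Nat → List Bool → List Int → Bool
  | 0, _, _ => false
  | fuel + 1, visited, queue =>
    match queue with
    | [] => false
    | current :: rest =>                                  -- current = queue.pop(0)
      if current == end_ then true
      else
        let st := (PySem.List.pyRange 0 (matrix.length : Int) 1).foldl
                    (pvBfsStep matrix current) (visited, rest)
        pvBfsLoop matrix end_ fuel st.1 st.2

def path_exists_bfs (matrix : List (List Int)) (start : Int) (end_ : Int) : Bool :=
  let visited := List.replicate matrix.length false       -- [False] * len(matrix)
  let queue := [start]
  let visited := PySem.List.pySetD visited start true     -- visited[start] = True (in range under Pre_)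
  pvBfsLoop matrix end_ (matrix.length + 2) visited queue

-- ===== PORT B =====
-- innermost 'for v in range(n)' body of B; state = (reach, changed)
def pvSatCell (matrix : List (List Int)) (u : Int)
    (st : List Bool × Bool) (v : Int) : List Bool × Bool :=
  if (PySem.List.pyGetD (PySem.List.pyGetD matrix u []) v 0 == 1)
      && !(PySem.List.pyGetD st.1 v false) then
    (PySem.List.pySetD st.1 v true, true)
  else st

-- 'for u in range(n): if reach[u]: …' body of B
def pvSatRow (matrix : List (List Int)) (st : List Bool × Bool) (u : Int) :
    List Bool × Bool :=
  if PySem.List.pyGetD st.1 u false then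
    (PySem.List.pyRange 0 (matrix.length : Int) 1).foldl (pvSatCell matrix u) st
  else st

-- B's 'while changed:' loop (entered at least once, changed starts True); fuel only
-- makes it total, matrix.length + 2 rounds provably reach the fixpoint under Pre_
def pvSatLoop (matrix : List (List Int)) : Nat → List Bool → List Bool
  | 0, reach => reach
  | fuel + 1, reach =>
    let st := (PySem.List.pyRange 0 (matrix.length : Int) 1).foldl
                (pvSatRow matrix) (reach, false)
    if st.2 then pvSatLoop matrix fuel st.1 else st.1

def path_exists_bfs_alt (matrix : List (List Int)) (start : Int) (end_ : Int) : Bool :=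
  if start == end_ then true
  else
    let reach := PySem.List.pySetD (List.replicate matrix.length false) start true
    let final := pvSatLoop matrix (matrix.length + 2) reach
    decide (0 ≤ end_) && decide (end_ < (matrix.length : Int))
      && PySem.List.pyGetD final end_ false

-- ===== PRECONDITION & SPEC =====
-- Pre_ is the natural domain: every row of the adjacency matrix has at least
-- matrix.length entries (A reads matrix[current][i] for i < len(matrix) on every
-- node it reaches, and raises IndexError on a reached short row) and start is a
-- valid Python index into visited (out of range raises at visited[start] = True).
-- It also excludes ragged matrices on which A happens to return because the short
-- rows are never reached; A and B read exactly the rows they reach, see the cites.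
def Pre_path_exists_bfs (matrix : List (List Int)) (start : Int) (end_ : Int) : Prop :=
  (∀ row ∈ matrix, matrix.length ≤ row.length) ∧
    -(matrix.length : Int) ≤ start ∧ start < (matrix.length : Int)

instance (matrix : List (List Int)) (start : Int) (end_ : Int) :
    Decidable (Pre_path_exists_bfs matrix start end_) := by
  unfold Pre_path_exists_bfs; infer_instance

def pvWitness_path_exists_bfs : List (List Int) × Int × Int :=
  ([[0, 1], [0, 0]], 0, 1)

-- On a well-formed matrix with an in-range negative start and end = start + len(matrix)
-- (the nonnegative index of the start node itself), A returns False because it only ever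
-- compares the literal value start against end while marking index start + n visited,
-- whereas B returns True, the intended answer since end names the very node the search
-- starts from.
def D_path_exists_bfs (matrix : List (List Int)) (start : Int) (end_ : Int) : Prop :=
  -(matrix.length : Int) ≤ start ∧ start < 0 ∧ end_ = start + (matrix.length : Int)

instance (matrix : List (List Int)) (start : Int) (end_ : Int) :
    Decidable (D_path_exists_bfs matrix start end_) := by
  unfold D_path_exists_bfs; infer_instance

def Spec_path_exists_bfs (matrix : List (List Int)) (start : Int) (end_ : Int) (out : Bool) : Prop :=
  ¬ D_path_exists_bfs matrix start end_ → out = path_exists_bfs_alt matrix start end_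

instance (matrix : List (List Int)) (start : Int) (end_ : Int) (out : Bool) :
    Decidable (Spec_path_exists_bfs matrix start end_ out) := by
  unfold Spec_path_exists_bfs; infer_instance

def pvDiffWitness_path_exists_bfs : List (List Int) × Int × Int := ([[0]], -1, 0)

def pvDiffWitnessOut_path_exists_bfs : Bool × Bool := (false, true)

-- ===== CLAIM (what is proved, stated in full; the proofs are below) =====
def Claim_unchanged_path_exists_bfs : Prop := ∀ (matrix : List (List Int)) (start : Int) (end_ : Int), Dom_path_exists_bfs matrix start end_ → Pre_path_exists_bfs matrix start end_ → Spec_path_exists_bfs matrix start end_ (path_exists_bfs matrix start end_)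
def Claim_changed_path_exists_bfs : Prop := Dom_path_exists_bfs (pvDiffWitness_path_exists_bfs.1) (pvDiffWitness_path_exists_bfs.2.1) (pvDiffWitness_path_exists_bfs.2.2) ∧ Pre_path_exists_bfs (pvDiffWitness_path_exists_bfs.1) (pvDiffWitness_path_exists_bfs.2.1) (pvDiffWitness_path_exists_bfs.2.2) ∧ D_path_exists_bfs (pvDiffWitness_path_exists_bfs.1) (pvDiffWitness_path_exists_bfs.2.1) (pvDiffWitness_path_exists_bfs.2.2) ∧ path_exists_bfs (pvDiffWitness_path_exists_bfs.1) (pvDiffWitness_path_exists_bfs.2.1) (pvDiffWitness_path_exists_bfs.2.2) = pvDiffWitnessOut_path_exists_bfs.1 ∧ path_exists_bfs_alt (pvDiffWitness_path_exists_bfs.1) (pvDiffWitness_path_exists_bfs.2.1) (pvDiffWitness_path_exists_bfs.2.2) = pvDiffWitnessOut_path_exists_bfs.2 ∧ pvDiffWitnessOut_path_exists_bfs.1 ≠ pvDiffWitnessOut_path_exists_bfs.2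
def Claim_exact_path_exists_bfs : Prop := ∀ (matrix : List (List Int)) (start : Int) (end_ : Int), Dom_path_exists_bfs matrix start end_ → Pre_path_exists_bfs matrix start end_ → D_path_exists_bfs matrix start end_ → path_exists_bfs matrix start end_ ≠ path_exists_bfs_alt matrix start end_

-- ===== LEMMAS AND PROOFS =====

-- ---------- generic list helpers ----------
def pvIdx (n : Nat) (i : Int) : Nat := (if i < 0 then i + (n : Int) else i).toNat

theorem pvGetD_lt {xs : List Bool} {j : Nat} (h : xs.getD j false = true) : j < xs.length := by
  by_contra hj
  rw [List.getD_eq_getElem?_getD, List.getElem?_eq_none (by omega)] at h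
  simp at h

theorem pvGetD_set_self {xs : List Bool} {j : Nat} (v d : Bool) (h : j < xs.length) :
    (xs.set j v).getD j d = v := by
  rw [List.getD_eq_getElem?_getD, List.getElem?_set_self (by omega)]
  simp

theorem pvGetD_set_ne {xs : List Bool} {j k : Nat} (v d : Bool) (h : j ≠ k) :
    (xs.set k v).getD j d = xs.getD j d := by
  rw [List.getD_eq_getElem?_getD, List.getElem?_set_ne (by omega), ← List.getD_eq_getElem?_getD]

theorem pvCount_false_set {xs : List Bool} {j : Nat} (hj : j < xs.length)
    (h : xs.getD j false = false) : (xs.set j true).count false + 1 = xs.count false := by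
  induction xs generalizing j with
  | nil => simp at hj
  | cons x t ih =>
    cases j with
    | zero =>
      simp [List.getD] at h
      subst h
      simp [List.count_cons]
    | succ j =>
      have := ih (j := j) (by simpa using hj) (by simpa [List.getD] using h)
      simp [List.count_cons, List.set]
      omega

def pvLe (a b : List Bool) : Prop := ∀ j, a.getD j false = true → b.getD j false = true

theorem pvLe_refl (a : List Bool) : pvLe a a := fun _ h => h

theorem pvLe_trans {a b c : List Bool} (h1 : pvLe a b) (h2 : pvLe b c) : pvLe a c :=
  fun j hj => h2 j (h1 j hj)

theorem pvLe_set_true (a : List Bool) (v : Nat) : pvLe a (a.set v true) := by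
  intro j hj
  by_cases hjv : j = v
  · subst hjv
    by_cases hl : j < a.length
    · rw [pvGetD_set_self _ _ hl]
    · rw [List.set_eq_of_length_le (by omega)]
      exact hj
  · rw [pvGetD_set_ne _ _ hjv]
    exact hj

theorem pvFoldInv {α β : Type} (l : List β) (f : α → β → α) (P : α → Prop)
    (h : ∀ st x, x ∈ l → P st → P (f st x)) (init : α) (hP : P init) :
    P (l.foldl f init) := by
  induction l generalizing init with
  | nil => exact hP
  | cons x t ih =>
    exact ih (fun st y hy => h st y (by simp [hy])) _ (h init x (by simp) hP)

-- ---------- PySem wrap bridges ----------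
theorem pvGetWrap {α : Type} [Inhabited α] (xs : List α) (i : Int) (d : α)
    (h1 : -(xs.length : Int) ≤ i) (h2 : i < (xs.length : Int)) :
    PySem.List.pyGetD xs i d = xs.getD (pvIdx xs.length i) d := by
  unfold pvIdx PySem.List.pyGetD PySem.List.pyGet? PySem.List.pyIdx?
  by_cases h3 : i < 0
  · rw [if_neg (by omega), if_pos h1]
    have hl : xs.length - (-i).toNat = (i + (xs.length : Int)).toNat := by omega
    rw [if_pos h3, hl]
    simp [List.getD_eq_getElem?_getD,
      List.getElem?_eq_getElem (by omega : (i + (xs.length : Int)).toNat < xs.length)]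
  · rw [if_pos (by omega), if_pos h2, if_neg h3]
    simp [List.getD_eq_getElem?_getD,
      List.getElem?_eq_getElem (by omega : i.toNat < xs.length)]

theorem pvSetWrap {α : Type} (xs : List α) (i : Int) (v : α)
    (h1 : -(xs.length : Int) ≤ i) (h2 : i < (xs.length : Int)) :
    PySem.List.pySetD xs i v = xs.set (pvIdx xs.length i) v := by
  unfold pvIdx PySem.List.pySetD PySem.List.pySet?
  simp only [PySem.List.pyIdx?]
  by_cases h3 : i < 0
  · rw [if_neg (by omega), if_pos h1, if_pos h3]
    simp only [Option.map_some, Option.getD_some]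
    congr 1
    omega
  · rw [if_pos (by omega), if_pos h2, if_neg h3]
    simp

theorem pvIdx_lt (n : Nat) (i : Int) (h1 : -(n : Int) ≤ i) (h2 : i < (n : Int)) :
    pvIdx n i < n := by
  unfold pvIdx
  split <;> omega

theorem pvFoldRange {α : Type} (n : Nat) (f : α → Int → α) (init : α) :
    (PySem.List.pyRange 0 (n : Int) 1).foldl f init
      = List.foldl (fun st (k : Nat) => f st (k : Int)) init (List.range n) := by
  have h : PySem.List.pyRange 0 (n : Int) 1 = List.map (fun k : Nat => (k : Int)) (List.range n) := by
    rw [PySem.List.pyRange_one]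
    have h2 : ((n : Int) - 0).toNat = n := by omega
    rw [h2]
    exact List.map_congr_left (fun a _ => by omega)
  rw [h, List.foldl_map]

-- ---------- the graph ----------
def pvE (matrix : List (List Int)) (u v : Nat) : Prop :=
  v < matrix.length ∧ (matrix.getD u []).getD v 0 = 1

def pvR (matrix : List (List Int)) : Nat → Nat → Prop := Relation.ReflTransGen (pvE matrix)

-- escape lemma: from a marked node, any path to an unmarked node passes the frontier Q
theorem pvPathEscape {matrix : List (List Int)} {vis Q : Nat → Prop}
    (hclosed : ∀ w, vis w → Q w ∨ ∀ x, pvE matrix w x → vis x) :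
    ∀ w v, pvR matrix w v → vis w → ¬ vis v → ∃ q, Q q ∧ pvR matrix q v := by
  intro w v h
  induction h using Relation.ReflTransGen.head_induction_on with
  | refl => intro hv hnv; exact absurd hv hnv
  | head hstep htail ih =>
    rename_i a c
    intro ha hnv
    rcases hclosed a ha with hq | hall
    · exact ⟨a, hq, Relation.ReflTransGen.head hstep htail⟩
    · exact ih (hall _ hstep) hnv

-- ---------- A side, Nat level ----------
def pvGRow (rw : List Int) (st : List Bool × List Int) (k : Nat) : List Bool × List Int :=
  if (rw.getD k 0 == 1) && !(st.1.getD k false) then (st.1.set k true, st.2 ++ [(k : Int)])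
  else st

def pvNew (rw : List Int) (vis : List Bool) (l : List Nat) : List Nat :=
  l.filter (fun k => (rw.getD k 0 == 1) && !(vis.getD k false))

def pvMarks (vis : List Bool) (S : List Nat) : List Bool :=
  S.foldl (fun v k => v.set k true) vis

theorem pvBfsStep_nat (matrix : List (List Int)) (current : Int)
    (st : List Bool × List Int) (k : Nat) :
    pvBfsStep matrix current st (k : Int)
      = pvGRow (PySem.List.pyGetD matrix current []) st k := by
  simp [pvBfsStep, pvGRow]

theorem pvMarks_length (vis : List Bool) (S : List Nat) :
    (pvMarks vis S).length = vis.length := by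
  induction S generalizing vis with
  | nil => rfl
  | cons k S ih => simp [pvMarks, List.foldl_cons] at *; rw [ih]; simp

theorem pvMarks_getD (vis : List Bool) (S : List Nat) (hS : ∀ k ∈ S, k < vis.length) (j : Nat) :
    (pvMarks vis S).getD j false = (vis.getD j false || decide (j ∈ S)) := by
  induction S generalizing vis with
  | nil => simp [pvMarks]
  | cons k S ih =>
    have hk := hS k (by simp)
    have hrest : ∀ x ∈ S, x < (vis.set k true).length := by
      intro x hx; simpa using hS x (by simp [hx])
    have := ih (vis.set k true) hrest
    simp only [pvMarks, List.foldl_cons] at *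
    rw [this]
    by_cases hj : j = k
    · subst hj
      rw [pvGetD_set_self _ _ hk]
      simp
    · rw [pvGetD_set_ne _ _ hj]
      simp [List.mem_cons, hj]

theorem pvMarks_count (vis : List Bool) (S : List Nat) (hnd : S.Nodup)
    (hS : ∀ k ∈ S, k < vis.length ∧ vis.getD k false = false) :
    (pvMarks vis S).count false + S.length = vis.count false := by
  induction S generalizing vis with
  | nil => simp [pvMarks]
  | cons k S ih =>
    rcases hS k (by simp) with ⟨hk, hkf⟩
    have hknotin : k ∉ S := (List.nodup_cons.mp hnd).1
    have hrest : ∀ x ∈ S, x < (vis.set k true).length ∧ (vis.set k true).getD x false = false := by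
      intro x hx
      refine ⟨by simpa using (hS x (by simp [hx])).1, ?_⟩
      rw [pvGetD_set_ne _ _ (by rintro rfl; exact hknotin hx)]
      exact (hS x (by simp [hx])).2
    have := ih (vis.set k true) (List.nodup_cons.mp hnd).2 hrest
    have hcnt := pvCount_false_set hk hkf
    simp only [pvMarks, List.foldl_cons, List.length_cons] at *
    omega

theorem pvFoldA_char (rw : List Int) (l : List Nat) (hl : l.Nodup) :
    ∀ (vis : List Bool) (acc : List Int),
      l.foldl (pvGRow rw) (vis, acc)
        = (pvMarks vis (pvNew rw vis l), acc ++ (pvNew rw vis l).map (fun k : Nat => (k : Int))) := by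
  induction l with
  | nil => intro vis acc; simp [pvNew, pvMarks]
  | cons k l ih =>
    intro vis acc
    have hknotin : k ∉ l := (List.nodup_cons.mp hl).1
    have ihl := ih (List.nodup_cons.mp hl).2
    by_cases hc : (rw.getD k 0 == 1) && !(vis.getD k false)
    · have hfilt : pvNew rw (vis.set k true) l = pvNew rw vis l := by
        unfold pvNew
        apply List.filter_congr
        intro x hx
        rw [pvGetD_set_ne _ _ (by rintro rfl; exact hknotin hx)]
      simp only [List.foldl_cons, pvGRow, hc, if_pos]
      rw [ihl, hfilt]
      have hne : pvNew rw vis (k :: l) = k :: pvNew rw vis l := by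
        unfold pvNew; simp only [List.filter_cons, hc]; simp
      rw [hne]
      simp [pvMarks, List.foldl_cons]
    · rw [Bool.not_eq_true] at hc
      have hne : pvNew rw vis (k :: l) = pvNew rw vis l := by
        unfold pvNew; simp only [List.filter_cons, hc]; simp
      simp only [List.foldl_cons, pvGRow, hc, Bool.false_eq_true, if_false, hne]
      exact ihl vis acc

-- invariants for A's loop
def pvQinv (matrix : List (List Int)) (vis : List Bool) (Q : List Nat) : Prop :=
  ∀ q ∈ Q, q < matrix.length ∧ vis.getD q false = true

def pvDone (matrix : List (List Int)) (vis : List Bool) (Q : List Nat) : Prop :=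
  ∀ u, vis.getD u false = true →
    u ∈ Q ∨ ∀ x, pvE matrix u x → vis.getD x false = true

def pvGoal (matrix : List (List Int)) (end_ : Int) (vis : List Bool) (Q : List Nat) : Prop :=
  ∃ v, v < matrix.length ∧ (v : Int) = end_ ∧
    (v ∈ Q ∨ (vis.getD v false = false ∧ ∃ q ∈ Q, pvR matrix q v))

theorem pvLoopA_char (matrix : List (List Int)) (end_ : Int) :
    ∀ (fuel : Nat) (vis : List Bool) (Q : List Nat),
      vis.length = matrix.length →
      pvQinv matrix vis Q → pvDone matrix vis Q →
      Q.length + vis.count false + 1 ≤ fuel →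
      (pvBfsLoop matrix end_ fuel vis (Q.map (fun k : Nat => (k : Int))) = true
        ↔ pvGoal matrix end_ vis Q) := by
  intro fuel
  induction fuel with
  | zero => intro vis Q _ _ _ hfuel; omega
  | succ fuel ih =>
    intro vis Q hlen hQ hD hfuel
    cases Q with
    | nil => simp [pvBfsLoop, pvGoal]
    | cons u R =>
      rw [List.map_cons]
      by_cases hue : (u : Int) = end_
      · have hbe : ((u : Int) == end_) = true := by simp [hue]
        constructor
        · intro _
          exact ⟨u, (hQ u (by simp)).1, hue, Or.inl (by simp)⟩
        · intro _
          show (if (u : Int) == end_ then true else _) = true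
          rw [hbe]
          rfl
      · have hbe : ((u : Int) == end_) = false := by simp [hue]
        -- normalize one loop iteration
        have hrow : PySem.List.pyGetD matrix (u : Int) [] = matrix.getD u [] :=
          PySem.List.pyGetD_natCast _ _ _
        have hfn : (fun (st : List Bool × List Int) (k : Nat) => pvBfsStep matrix (u : Int) st (k : Int))
            = pvGRow (matrix.getD u []) := by
          funext st k
          rw [pvBfsStep_nat, hrow]
        set S := pvNew (matrix.getD u []) vis (List.range matrix.length) with hS
        have hnodupS : S.Nodup := List.Nodup.filter _ List.nodup_range
        have hSsub : ∀ k ∈ S, k < matrix.length ∧ (matrix.getD u []).getD k 0 = 1 ∧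
            vis.getD k false = false := by
          intro k hk
          rw [hS] at hk
          unfold pvNew at hk
          rcases List.mem_filter.mp hk with ⟨hkr, hcond⟩
          rcases (Bool.and_eq_true _ _).mp hcond with ⟨hb1, hb2⟩
          exact ⟨List.mem_range.mp hkr, beq_iff_eq.mp hb1, by simpa using hb2⟩
        have hSmem : ∀ k, k < matrix.length → (matrix.getD u []).getD k 0 = 1 →
            vis.getD k false = false → k ∈ S := by
          intro k h1 h2 h3
          rw [hS]
          unfold pvNew
          refine List.mem_filter.mpr ⟨List.mem_range.mpr h1, ?_⟩
          rw [Bool.and_eq_true]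
          exact ⟨beq_iff_eq.mpr h2, by rw [h3]; rfl⟩
        have hSn : ∀ k ∈ S, k < vis.length := fun k hk => by
          rw [hlen]; exact (hSsub k hk).1
        set vis2 := pvMarks vis S with hvis2d
        have hvis2 : ∀ j, vis2.getD j false = (vis.getD j false || decide (j ∈ S)) :=
          pvMarks_getD vis S hSn
        have hlen2 : vis2.length = matrix.length := by
          rw [hvis2d, pvMarks_length, hlen]
        have hcount : vis2.count false + S.length = vis.count false :=
          pvMarks_count vis S hnodupS (fun k hk => ⟨hSn k hk, (hSsub k hk).2.2⟩)
        have hst : (PySem.List.pyRange 0 (matrix.length : Int) 1).foldl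
              (pvBfsStep matrix (u : Int)) (vis, R.map (fun k : Nat => (k : Int)))
            = (vis2, ((R ++ S).map (fun k : Nat => (k : Int)))) := by
          rw [pvFoldRange, hfn, pvFoldA_char _ _ List.nodup_range, List.map_append]
        have hQ2 : pvQinv matrix vis2 (R ++ S) := by
          intro q hq
          rcases List.mem_append.mp hq with hq | hq
          · refine ⟨(hQ q (by simp [hq])).1, ?_⟩
            rw [hvis2, (hQ q (by simp [hq])).2]
            rfl
          · refine ⟨(hSsub q hq).1, ?_⟩
            rw [hvis2, decide_eq_true hq, Bool.or_true]
        have hD2 : pvDone matrix vis2 (R ++ S) := by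
          intro w hw
          rw [hvis2] at hw
          rcases (Bool.or_eq_true _ _).mp hw with hw | hw
          · rcases hD w hw with hwQ | hproc
            · rcases List.mem_cons.mp hwQ with hwu | hwR
              · subst hwu
                right
                intro x hx
                rw [hvis2]
                by_cases hvx : vis.getD x false = true
                · rw [hvx]
                  rfl
                · have hxS : x ∈ S := hSmem x hx.1 hx.2 (by simpa using hvx)
                  rw [decide_eq_true hxS, Bool.or_true]
              · exact Or.inl (List.mem_append.mpr (Or.inl hwR))
            · right
              intro x hx
              rw [hvis2, hproc x hx]
              rfl
          · exact Or.inl (List.mem_append.mpr (Or.inr (by simpa using hw)))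
        have hfuel2 : (R ++ S).length + vis2.count false + 1 ≤ fuel := by
          rw [List.length_append]
          simp only [List.length_cons] at hfuel
          omega
        have hIH := ih vis2 (R ++ S) hlen2 hQ2 hD2 hfuel2
        have hunf : pvBfsLoop matrix end_ (fuel + 1) vis ((u : Int) :: R.map (fun k : Nat => (k : Int)))
            = pvBfsLoop matrix end_ fuel vis2 ((R ++ S).map (fun k : Nat => (k : Int))) := by
          show (if (u : Int) == end_ then true
            else
              (fun st : List Bool × List Int => pvBfsLoop matrix end_ fuel st.1 st.2)
                ((PySem.List.pyRange 0 (matrix.length : Int) 1).foldl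
                  (pvBfsStep matrix (u : Int)) (vis, R.map (fun k : Nat => (k : Int))))) = _
          rw [hbe, hst]
          rfl
        rw [hunf, hIH]
        clear hunf hIH
        -- frontier exchange
        constructor
        · rintro ⟨v, hvn, hve, hcase⟩
          rcases hcase with hvQ2 | ⟨hvf2, q, hqQ2, hr⟩
          · rcases List.mem_append.mp hvQ2 with hvR | hvS
            · exact ⟨v, hvn, hve, Or.inl (by simp [hvR])⟩
            · rcases hSsub v hvS with ⟨_, hedge, hvf⟩
              exact ⟨v, hvn, hve, Or.inr ⟨hvf, u, by simp,
                Relation.ReflTransGen.single ⟨hvn, hedge⟩⟩⟩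
          · have hvf : vis.getD v false = false := by
              by_contra hc
              have hcv : vis2.getD v false = true := by
                rw [hvis2, (by simpa using hc : vis.getD v false = true)]
                rfl
              rw [hcv] at hvf2
              exact absurd hvf2 (by simp)
            rcases List.mem_append.mp hqQ2 with hqR | hqS
            · exact ⟨v, hvn, hve, Or.inr ⟨hvf, q, by simp [hqR], hr⟩⟩
            · rcases hSsub q hqS with ⟨hqn, hqe, _⟩
              exact ⟨v, hvn, hve, Or.inr ⟨hvf, u, by simp,
                Relation.ReflTransGen.head ⟨hqn, hqe⟩ hr⟩⟩
        · rintro ⟨v, hvn, hve, hcase⟩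
          rcases hcase with hvQ | ⟨hvf, q, hqQ, hr⟩
          · rcases List.mem_cons.mp hvQ with hvu | hvR
            · exact absurd (hvu ▸ hve) hue
            · exact ⟨v, hvn, hve, Or.inl (List.mem_append.mpr (Or.inl hvR))⟩
          · by_cases hvS : v ∈ S
            · exact ⟨v, hvn, hve, Or.inl (List.mem_append.mpr (Or.inr hvS))⟩
            · have hv2 : vis2.getD v false = false := by
                rw [hvis2, hvf]
                simp [hvS]
              rcases List.mem_cons.mp hqQ with hqu | hqR
              · subst hqu
                have hvisu2 : vis2.getD q false = true := by
                  rw [hvis2, (hQ q (by simp)).2]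
                  rfl
                obtain ⟨q', hq', hr'⟩ := pvPathEscape
                  (vis := fun w => vis2.getD w false = true)
                  (Q := fun w => w ∈ R ++ S) hD2 q v hr hvisu2 (by
                    intro hcon
                    have hcon' : vis2.getD v false = true := hcon
                    rw [hv2] at hcon'
                    exact Bool.false_ne_true hcon')
                exact ⟨v, hvn, hve, Or.inr ⟨hv2, q', hq', hr'⟩⟩
              · exact ⟨v, hvn, hve, Or.inr ⟨hv2, q, List.mem_append.mpr (Or.inl hqR), hr⟩⟩

theorem pvA_char (matrix : List (List Int)) (start end_ : Int)
    (h1 : -(matrix.length : Int) ≤ start) (h2 : start < (matrix.length : Int)) :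
    (path_exists_bfs matrix start end_ = true
      ↔ (end_ = start ∨ ∃ v, v < matrix.length ∧ v ≠ pvIdx matrix.length start ∧
            pvR matrix (pvIdx matrix.length start) v ∧ (v : Int) = end_)) := by
  have hrl : (List.replicate matrix.length false).length = matrix.length := by simp
  have hset : PySem.List.pySetD (List.replicate matrix.length false) start true
      = (List.replicate matrix.length false).set (pvIdx matrix.length start) true := by
    rw [pvSetWrap _ _ _ (by rw [hrl]; exact h1) (by rw [hrl]; exact h2), hrl]
  set s := pvIdx matrix.length start with hsdef
  set vis0 := (List.replicate matrix.length false).set s true with hvis0d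
  have hslt : s < matrix.length := pvIdx_lt matrix.length start h1 h2
  have hlen0 : vis0.length = matrix.length := by simp [hvis0d]
  have hrep : ∀ v : Nat, (List.replicate matrix.length false).getD v false = false := by
    intro v
    simp [List.getD_eq_getElem?_getD, List.getElem?_replicate]
    split <;> rfl
  have hget0 : ∀ v : Nat, vis0.getD v false = true ↔ v = s := by
    intro v
    constructor
    · intro hv
      by_contra hvs
      rw [hvis0d, pvGetD_set_ne _ _ hvs, hrep v] at hv
      exact absurd hv (by simp)
    · intro hv
      rw [hv, hvis0d, pvGetD_set_self _ _ (by rw [hrl]; exact hslt)]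
  have hstart : path_exists_bfs matrix start end_
      = pvBfsLoop matrix end_ (matrix.length + 2) vis0 [start] := by
    show pvBfsLoop matrix end_ (matrix.length + 2)
      (PySem.List.pySetD (List.replicate matrix.length false) start true) [start] = _
    rw [hset]
  rw [hstart]
  by_cases hse : start = end_
  · have hbe : (start == end_) = true := by simp [hse]
    constructor
    · intro _
      exact Or.inl hse.symm
    · intro _
      show (if start == end_ then true else _) = true
      rw [hbe]
      rfl
  · have hbe : (start == end_) = false := by simp [hse]
    have hrowm : PySem.List.pyGetD matrix start [] = matrix.getD s [] := by
      rw [pvGetWrap matrix start [] h1 h2]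
    have hfn : (fun (st : List Bool × List Int) (k : Nat) => pvBfsStep matrix start st (k : Int))
        = pvGRow (matrix.getD s []) := by
      funext st k
      rw [pvBfsStep_nat, hrowm]
    set S0 := pvNew (matrix.getD s []) vis0 (List.range matrix.length) with hS0
    have hnodupS : S0.Nodup := List.Nodup.filter _ List.nodup_range
    have hS0sub : ∀ k ∈ S0, k < matrix.length ∧ (matrix.getD s []).getD k 0 = 1 ∧
        vis0.getD k false = false := by
      intro k hk
      rw [hS0] at hk
      unfold pvNew at hk
      rcases List.mem_filter.mp hk with ⟨hkr, hcond⟩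
      rcases (Bool.and_eq_true _ _).mp hcond with ⟨hb1, hb2⟩
      exact ⟨List.mem_range.mp hkr, beq_iff_eq.mp hb1, by simpa using hb2⟩
    have hS0mem : ∀ k, k < matrix.length → (matrix.getD s []).getD k 0 = 1 →
        vis0.getD k false = false → k ∈ S0 := by
      intro k ha hb hc
      rw [hS0]
      unfold pvNew
      refine List.mem_filter.mpr ⟨List.mem_range.mpr ha, ?_⟩
      rw [Bool.and_eq_true]
      exact ⟨beq_iff_eq.mpr hb, by rw [hc]; rfl⟩
    have hS0n : ∀ k ∈ S0, k < vis0.length := fun k hk => by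
      rw [hlen0]; exact (hS0sub k hk).1
    set vis1 := pvMarks vis0 S0 with hvis1d
    have hvis1 : ∀ j, vis1.getD j false = (vis0.getD j false || decide (j ∈ S0)) :=
      pvMarks_getD vis0 S0 hS0n
    have hlen1 : vis1.length = matrix.length := by
      rw [hvis1d, pvMarks_length, hlen0]
    have hcount : vis1.count false + S0.length = vis0.count false :=
      pvMarks_count vis0 S0 hnodupS (fun k hk => ⟨hS0n k hk, (hS0sub k hk).2.2⟩)
    have hc0 : vis0.count false + 1 = matrix.length := by
      have := pvCount_false_set (xs := List.replicate matrix.length false) (j := s)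
        (by rw [hrl]; exact hslt) (hrep s)
      rw [← hvis0d] at this
      simpa using this
    have hvis1s : vis1.getD s false = true := by
      rw [hvis1, (hget0 s).mpr rfl]
      rfl
    have hst0 : (PySem.List.pyRange 0 (matrix.length : Int) 1).foldl
          (pvBfsStep matrix start) (vis0, ([] : List Int))
        = (vis1, S0.map (fun k : Nat => (k : Int))) := by
      rw [pvFoldRange, hfn, pvFoldA_char _ _ List.nodup_range, List.nil_append]
    have hQ1 : pvQinv matrix vis1 S0 := by
      intro q hq
      refine ⟨(hS0sub q hq).1, ?_⟩
      rw [hvis1, decide_eq_true hq, Bool.or_true]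
    have hD1 : pvDone matrix vis1 S0 := by
      intro w hw
      rw [hvis1] at hw
      rcases (Bool.or_eq_true _ _).mp hw with hw | hw
      · have hws : w = s := (hget0 w).mp hw
        subst hws
        right
        intro x hx
        rw [hvis1]
        by_cases hvx : vis0.getD x false = true
        · rw [hvx]
          rfl
        · have hxS : x ∈ S0 := hS0mem x hx.1 hx.2 (by simpa using hvx)
          rw [decide_eq_true hxS, Bool.or_true]
      · exact Or.inl (by simpa using hw)
    have hfuel1 : S0.length + vis1.count false + 1 ≤ matrix.length + 1 := by omega
    have hMain := pvLoopA_char matrix end_ (matrix.length + 1) vis1 S0 hlen1 hQ1 hD1 hfuel1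
    have hunf : pvBfsLoop matrix end_ (matrix.length + 2) vis0 [start]
        = pvBfsLoop matrix end_ (matrix.length + 1) vis1 (S0.map (fun k : Nat => (k : Int))) := by
      show (if start == end_ then true
        else
          (fun st : List Bool × List Int => pvBfsLoop matrix end_ (matrix.length + 1) st.1 st.2)
            ((PySem.List.pyRange 0 (matrix.length : Int) 1).foldl
              (pvBfsStep matrix start) (vis0, ([] : List Int)))) = _
      rw [hbe, hst0]
      rfl
    rw [hunf, hMain]
    constructor
    · rintro ⟨v, hvn, hve, hcase⟩
      right
      rcases hcase with hvS | ⟨hvf, q, hqS, hr⟩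
      · rcases hS0sub v hvS with ⟨_, hedge, hvf0⟩
        have hvs : v ≠ s := by
          intro h
          rw [h, (hget0 s).mpr rfl] at hvf0
          simp at hvf0
        exact ⟨v, hvn, hvs, Relation.ReflTransGen.single ⟨hvn, hedge⟩, hve⟩
      · have hvs : v ≠ s := by
          intro h
          rw [h, hvis1s] at hvf
          simp at hvf
        rcases hS0sub q hqS with ⟨hqn, hqe, _⟩
        exact ⟨v, hvn, hvs, Relation.ReflTransGen.head ⟨hqn, hqe⟩ hr, hve⟩
    · rintro (h | ⟨v, hvn, hvs, hr, hve⟩)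
      · exact absurd h.symm hse
      · by_cases hvS : v ∈ S0
        · exact ⟨v, hvn, hve, Or.inl hvS⟩
        · have hv0 : vis0.getD v false = false := by
            cases hval : vis0.getD v false
            · rfl
            · exact absurd ((hget0 v).mp hval) hvs
          have hv1 : vis1.getD v false = false := by
            rw [hvis1, hv0, decide_eq_false hvS]
            rfl
          obtain ⟨q', hq', hr'⟩ := pvPathEscape
            (vis := fun w => vis1.getD w false = true)
            (Q := fun w => w ∈ S0) hD1 s v hr hvis1s (by
              intro hcon
              have hcon' : vis1.getD v false = true := hcon
              rw [hv1] at hcon'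
              exact Bool.false_ne_true hcon')
          exact ⟨v, hvn, hve, Or.inr ⟨hv1, q', hq', hr'⟩⟩

-- ---------- B side, Nat level ----------
def pvHCell (matrix : List (List Int)) (u : Nat) (st : List Bool × Bool) (v : Nat) :
    List Bool × Bool :=
  if ((matrix.getD u []).getD v 0 == 1) && !(st.1.getD v false) then (st.1.set v true, true)
  else st

def pvHRow (matrix : List (List Int)) (st : List Bool × Bool) (u : Nat) : List Bool × Bool :=
  if st.1.getD u false then (List.range matrix.length).foldl (pvHCell matrix u) st else st

def pvSweep (matrix : List (List Int)) (reach : List Bool) : List Bool × Bool :=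
  (List.range matrix.length).foldl (pvHRow matrix) (reach, false)

def pvLoopN (matrix : List (List Int)) : Nat → List Bool → List Bool
  | 0, reach => reach
  | fuel + 1, reach =>
    let st := pvSweep matrix reach
    if st.2 then pvLoopN matrix fuel st.1 else st.1

theorem pvSatCell_nat (matrix : List (List Int)) (u v : Nat) (st : List Bool × Bool) :
    pvSatCell matrix (u : Int) st (v : Int) = pvHCell matrix u st v := by
  simp [pvSatCell, pvHCell]

theorem pvSatRow_nat (matrix : List (List Int)) (st : List Bool × Bool) (k : Nat) :
    pvSatRow matrix st (k : Int) = pvHRow matrix st k := by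
  unfold pvSatRow pvHRow
  rw [pvFoldRange, PySem.List.pyGetD_natCast]
  have hf : (fun (st : List Bool × Bool) (v : Nat) => pvSatCell matrix (k : Int) st (v : Int))
      = pvHCell matrix k := by
    funext st v
    exact pvSatCell_nat matrix k v st
  rw [hf]

theorem pvSatLoop_nat (matrix : List (List Int)) :
    ∀ (fuel : Nat) (reach : List Bool),
      pvSatLoop matrix fuel reach = pvLoopN matrix fuel reach := by
  intro fuel
  induction fuel with
  | zero => intro reach; rfl
  | succ fuel ih =>
    intro reach
    have hf : (fun (st : List Bool × Bool) (k : Nat) => pvSatRow matrix st (k : Int))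
        = pvHRow matrix := by
      funext st k
      exact pvSatRow_nat matrix st k
    simp only [pvSatLoop, pvLoopN, pvSweep]
    rw [pvFoldRange, hf]
    by_cases h : ((List.range matrix.length).foldl (pvHRow matrix) (reach, false)).2
      <;> simp [h, ih]

theorem pvHCell_len (matrix : List (List Int)) (u : Nat) (st : List Bool × Bool) (w : Nat) :
    (pvHCell matrix u st w).1.length = st.1.length := by
  unfold pvHCell
  split <;> simp

theorem pvInner_len (matrix : List (List Int)) (u : Nat) (l : List Nat) (st : List Bool × Bool) :
    (l.foldl (pvHCell matrix u) st).1.length = st.1.length := by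
  induction l generalizing st with
  | nil => rfl
  | cons w l ih => rw [List.foldl_cons, ih, pvHCell_len]

theorem pvHRow_len (matrix : List (List Int)) (st : List Bool × Bool) (u : Nat) :
    (pvHRow matrix st u).1.length = st.1.length := by
  unfold pvHRow
  split
  · exact pvInner_len matrix u _ st
  · rfl

theorem pvHCell_le (matrix : List (List Int)) (u : Nat) (st : List Bool × Bool) (w : Nat) :
    pvLe st.1 (pvHCell matrix u st w).1 := by
  unfold pvHCell
  split
  · exact pvLe_set_true _ _
  · exact pvLe_refl _

theorem pvInner_le (matrix : List (List Int)) (u : Nat) (l : List Nat) (st : List Bool × Bool) :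
    pvLe st.1 (l.foldl (pvHCell matrix u) st).1 := by
  induction l generalizing st with
  | nil => exact pvLe_refl _
  | cons w l ih =>
    rw [List.foldl_cons]
    exact pvLe_trans (pvHCell_le matrix u st w) (ih _)

theorem pvHRow_le (matrix : List (List Int)) (st : List Bool × Bool) (u : Nat) :
    pvLe st.1 (pvHRow matrix st u).1 := by
  unfold pvHRow
  split
  · exact pvInner_le matrix u _ st
  · exact pvLe_refl _

theorem pvOuter_le (matrix : List (List Int)) (l : List Nat) (st : List Bool × Bool) :
    pvLe st.1 (l.foldl (pvHRow matrix) st).1 := by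
  induction l generalizing st with
  | nil => exact pvLe_refl _
  | cons w l ih =>
    rw [List.foldl_cons]
    exact pvLe_trans (pvHRow_le matrix st w) (ih _)

-- sweep properties
def pvSweepInv (reach : List Bool) (st : List Bool × Bool) : Prop :=
  st.1.length = reach.length ∧ pvLe reach st.1 ∧
    (st.2 = false → st.1 = reach) ∧
    (st.2 = true → st.1.count false < reach.count false)

theorem pvHCell_inv (matrix : List (List Int)) (reach : List Bool)
    (hlen : reach.length = matrix.length) (u w : Nat) (hw : w < matrix.length)
    (st : List Bool × Bool) (h : pvSweepInv reach st) :
    pvSweepInv reach (pvHCell matrix u st w) := by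
  obtain ⟨hL, hle, hf, ht⟩ := h
  unfold pvHCell
  split
  · next hc =>
    have hwlt : w < st.1.length := by omega
    have hwf : st.1.getD w false = false := by
      have := (Bool.and_eq_true _ _).mp hc
      simpa using this.2
    have hcnt := pvCount_false_set hwlt hwf
    refine ⟨by simp [hL], pvLe_trans hle (pvLe_set_true _ _), by simp, ?_⟩
    intro _
    show (st.1.set w true).count false < reach.count false
    by_cases h2 : st.2 = true
    · have := ht h2
      omega
    · have heq := hf (by simpa using h2)
      rw [heq] at hcnt
      rw [heq]
      omega
  · exact ⟨hL, hle, hf, ht⟩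

theorem pvHRow_inv (matrix : List (List Int)) (reach : List Bool)
    (hlen : reach.length = matrix.length) (u : Nat)
    (st : List Bool × Bool) (h : pvSweepInv reach st) :
    pvSweepInv reach (pvHRow matrix st u) := by
  unfold pvHRow
  split
  · exact pvFoldInv (List.range matrix.length) (pvHCell matrix u) (pvSweepInv reach)
      (fun st w hw hP => pvHCell_inv matrix reach hlen u w (List.mem_range.mp hw) st hP) st h
  · exact h

theorem pvSweep_basic (matrix : List (List Int)) (reach : List Bool)
    (hlen : reach.length = matrix.length) :
    pvSweepInv reach (pvSweep matrix reach) := by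
  unfold pvSweep
  refine pvFoldInv (List.range matrix.length) (pvHRow matrix) (pvSweepInv reach)
    (fun st u _ hP => pvHRow_inv matrix reach hlen u st hP) (reach, false) ?_
  exact ⟨rfl, pvLe_refl _, fun _ => rfl, by simp⟩

theorem pvHCell_sound (matrix : List (List Int)) (Good : Nat → Prop)
    (hG : ∀ u v, Good u → pvE matrix u v → Good v) (u : Nat) (hGu : Good u)
    (w : Nat) (hw : w < matrix.length) (st : List Bool × Bool)
    (h : ∀ v, st.1.getD v false = true → Good v) :
    ∀ v, (pvHCell matrix u st w).1.getD v false = true → Good v := by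
  unfold pvHCell
  split
  · next hc =>
    intro v hv
    by_cases hvw : v = w
    · subst hvw
      refine hG u v hGu ⟨hw, ?_⟩
      have := (Bool.and_eq_true _ _).mp hc
      simpa using this.1
    · rw [pvGetD_set_ne _ _ hvw] at hv
      exact h v hv
  · exact h

theorem pvSweep_sound (matrix : List (List Int)) (reach : List Bool) (Good : Nat → Prop)
    (hG : ∀ u v, Good u → pvE matrix u v → Good v)
    (hsound : ∀ v, reach.getD v false = true → Good v) :
    ∀ v, (pvSweep matrix reach).1.getD v false = true → Good v := by
  unfold pvSweep
  refine pvFoldInv (List.range matrix.length) (pvHRow matrix)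
    (fun st => ∀ v, st.1.getD v false = true → Good v) ?_ (reach, false) hsound
  intro st u _ hP
  unfold pvHRow
  split
  · next hguard =>
    exact pvFoldInv (List.range matrix.length) (pvHCell matrix u)
      (fun st => ∀ v, st.1.getD v false = true → Good v)
      (fun st w hw hP' => pvHCell_sound matrix Good hG u (hP _ hguard) w
        (List.mem_range.mp hw) st hP') st hP
  · exact hP

theorem pvInnerSets (matrix : List (List Int)) (u v : Nat)
    (hrow : (matrix.getD u []).getD v 0 = 1) :
    ∀ (l : List Nat) (st : List Bool × Bool), v ∈ l → v < st.1.length →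
      (l.foldl (pvHCell matrix u) st).1.getD v false = true := by
  intro l
  induction l with
  | nil => intro st hv; simp at hv
  | cons w l ih =>
    intro st hv hvlt
    rw [List.foldl_cons]
    by_cases hvw : w = v
    · subst hvw
      have hset : (pvHCell matrix u st w).1.getD w false = true := by
        unfold pvHCell
        split
        · exact pvGetD_set_self _ _ (by simpa using hvlt)
        · next hc =>
          by_cases hg : st.1.getD w false = true
          · exact hg
          · exfalso
            apply hc
            rw [Bool.and_eq_true]
            rw [Bool.not_eq_true] at hg
            exact ⟨by rw [beq_iff_eq]; exact hrow, by rw [hg]; rfl⟩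
      exact pvInner_le matrix u l _ _ hset
    · have hvl : v ∈ l := by
        rcases List.mem_cons.mp hv with h | h
        · exact absurd h.symm hvw
        · exact h
      exact ih _ hvl (by rw [pvHCell_len]; exact hvlt)

theorem pvRowReach (matrix : List (List Int)) (u v : Nat) (he : pvE matrix u v) :
    ∀ (l : List Nat) (st : List Bool × Bool), u ∈ l →
      st.1.getD u false = true → st.1.length = matrix.length →
      (l.foldl (pvHRow matrix) st).1.getD v false = true := by
  intro l
  induction l with
  | nil => intro st hu; simp at hu
  | cons k l ih =>
    intro st hu hgu hlen
    rw [List.foldl_cons]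
    by_cases hku : k = u
    · subst hku
      have hrow : (pvHRow matrix st k).1.getD v false = true := by
        unfold pvHRow
        rw [if_pos hgu]
        exact pvInnerSets matrix k v he.2 (List.range matrix.length)
          st (List.mem_range.mpr he.1) (by have := he.1; omega)
      exact pvOuter_le matrix l _ _ hrow
    · have hul : u ∈ l := by
        rcases List.mem_cons.mp hu with h | h
        · exact absurd h.symm hku
        · exact h
      exact ih _ hul ((pvHRow_le matrix st k) u hgu) (by rw [pvHRow_len]; exact hlen)

theorem pvSweep_complete (matrix : List (List Int)) (reach : List Bool) (u v : Nat)
    (hu : reach.getD u false = true) (he : pvE matrix u v)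
    (hlen : reach.length = matrix.length) :
    (pvSweep matrix reach).1.getD v false = true := by
  unfold pvSweep
  exact pvRowReach matrix u v he (List.range matrix.length) (reach, false)
    (List.mem_range.mpr (by have := pvGetD_lt hu; omega)) hu hlen

theorem pvOuter_len (matrix : List (List Int)) (l : List Nat) (st : List Bool × Bool) :
    (l.foldl (pvHRow matrix) st).1.length = st.1.length := by
  induction l generalizing st with
  | nil => rfl
  | cons w l ih => rw [List.foldl_cons, ih, pvHRow_len]

theorem pvLoopN_len (matrix : List (List Int)) :
    ∀ (fuel : Nat) (reach : List Bool), (pvLoopN matrix fuel reach).length = reach.length := by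
  intro fuel
  induction fuel with
  | zero => intro reach; rfl
  | succ fuel ih =>
    intro reach
    show (if (pvSweep matrix reach).2 then pvLoopN matrix fuel (pvSweep matrix reach).1
        else (pvSweep matrix reach).1).length = reach.length
    have hsw : (pvSweep matrix reach).1.length = reach.length := pvOuter_len matrix _ _
    split
    · rw [ih, hsw]
    · exact hsw

theorem pvLoopB_char (matrix : List (List Int)) (Good : Nat → Prop)
    (hG : ∀ u v, Good u → pvE matrix u v → Good v) :
    ∀ (fuel : Nat) (reach : List Bool),
      reach.length = matrix.length →
      (∀ v, reach.getD v false = true → Good v) →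
      reach.count false < fuel →
      (∀ v, (pvLoopN matrix fuel reach).getD v false = true → Good v)
        ∧ (∀ u v, reach.getD u false = true → pvR matrix u v →
            (pvLoopN matrix fuel reach).getD v false = true) := by
  intro fuel
  induction fuel with
  | zero => intro reach _ _ hfuel; omega
  | succ fuel ih =>
    intro reach hlen hsound hfuel
    obtain ⟨hL, hle, hf, ht⟩ := pvSweep_basic matrix reach hlen
    have hsound' := pvSweep_sound matrix reach Good hG hsound
    have hunf : pvLoopN matrix (fuel + 1) reach
        = if (pvSweep matrix reach).2 then pvLoopN matrix fuel (pvSweep matrix reach).1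
          else (pvSweep matrix reach).1 := rfl
    by_cases hc : (pvSweep matrix reach).2 = true
    · rw [hunf, if_pos hc]
      have hcnt := ht hc
      obtain ⟨s1, c1⟩ := ih (pvSweep matrix reach).1 (by rw [hL, hlen]) hsound' (by omega)
      exact ⟨s1, fun u v hu hr => c1 u v (hle u hu) hr⟩
    · rw [hunf, if_neg hc]
      have heq := hf (by simpa using hc)
      rw [heq]
      refine ⟨hsound, ?_⟩
      intro u v hu hr
      have hclosed : ∀ a b, reach.getD a false = true → pvE matrix a b →
          reach.getD b false = true := by
        intro a b ha he
        have hcomp := pvSweep_complete matrix reach a b ha he hlen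
        rw [heq] at hcomp
        exact hcomp
      induction hr with
      | refl => exact hu
      | tail _ hstep ihr => exact hclosed _ _ ihr hstep

theorem pvB_char (matrix : List (List Int)) (start end_ : Int)
    (h1 : -(matrix.length : Int) ≤ start) (h2 : start < (matrix.length : Int)) :
    (path_exists_bfs_alt matrix start end_ = true
      ↔ (start = end_ ∨ (0 ≤ end_ ∧ end_ < (matrix.length : Int) ∧
            pvR matrix (pvIdx matrix.length start) end_.toNat))) := by
  by_cases hse : start = end_
  · simp [path_exists_bfs_alt, hse]
  · have hbe : (start == end_) = false := by simp [hse]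
    unfold path_exists_bfs_alt
    rw [hbe]
    simp only [Bool.false_eq_true, if_false]
    have hrl : (List.replicate matrix.length false).length = matrix.length := by simp
    have hset : PySem.List.pySetD (List.replicate matrix.length false) start true
        = (List.replicate matrix.length false).set (pvIdx matrix.length start) true := by
      rw [pvSetWrap _ _ _ (by rw [hrl]; exact h1) (by rw [hrl]; exact h2), hrl]
    rw [hset, pvSatLoop_nat]
    set s := pvIdx matrix.length start with hs
    set reach0 := (List.replicate matrix.length false).set s true with hreach0
    have hslt : s < matrix.length := pvIdx_lt matrix.length start h1 h2
    have hlen0 : reach0.length = matrix.length := by simp [hreach0]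
    have hrep : ∀ v : Nat, (List.replicate matrix.length false).getD v false = false := by
      intro v
      simp [List.getD_eq_getElem?_getD, List.getElem?_replicate]
      split <;> rfl
    have hget0 : ∀ v : Nat, reach0.getD v false = true ↔ v = s := by
      intro v
      constructor
      · intro hv
        by_contra hvs
        rw [hreach0, pvGetD_set_ne _ _ hvs, hrep v] at hv
        exact absurd hv (by simp)
      · intro hv
        rw [hv, hreach0, pvGetD_set_self _ _ (by rw [hrl]; exact hslt)]
    have hG : ∀ u v, pvR matrix s u → pvE matrix u v → pvR matrix s v :=
      fun u v hu he => Relation.ReflTransGen.tail hu he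
    have hsound0 : ∀ v, reach0.getD v false = true → pvR matrix s v := by
      intro v hv
      rw [(hget0 v).mp hv]
      exact Relation.ReflTransGen.refl
    have hcnt0 : reach0.count false < matrix.length + 2 := by
      have := List.count_le_length (l := reach0) (a := false)
      omega
    obtain ⟨hsnd, hcm⟩ := pvLoopB_char matrix (pvR matrix s) hG (matrix.length + 2)
      reach0 hlen0 hsound0 hcnt0
    have hflen : (pvLoopN matrix (matrix.length + 2) reach0).length = matrix.length := by
      rw [pvLoopN_len, hlen0]
    constructor
    · intro h
      rw [Bool.and_eq_true, Bool.and_eq_true] at h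
      obtain ⟨⟨hd1, hd2⟩, hd3⟩ := h
      have he0 : 0 ≤ end_ := of_decide_eq_true hd1
      have he1 : end_ < (matrix.length : Int) := of_decide_eq_true hd2
      rw [pvGetWrap _ _ _ (by rw [hflen]; omega) (by rw [hflen]; exact he1)] at hd3
      have hidx : pvIdx (pvLoopN matrix (matrix.length + 2) reach0).length end_ = end_.toNat := by
        unfold pvIdx
        rw [if_neg (by omega)]
      rw [hidx] at hd3
      exact Or.inr ⟨he0, he1, hsnd _ hd3⟩
    · intro h
      rcases h with h | ⟨he0, he1, hr⟩
      · exact absurd h hse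
      · rw [Bool.and_eq_true, Bool.and_eq_true]
        refine ⟨⟨decide_eq_true he0, decide_eq_true he1⟩, ?_⟩
        rw [pvGetWrap _ _ _ (by rw [hflen]; omega) (by rw [hflen]; exact he1)]
        have hidx : pvIdx (pvLoopN matrix (matrix.length + 2) reach0).length end_ = end_.toNat := by
          unfold pvIdx
          rw [if_neg (by omega)]
        rw [hidx]
        exact hcm s end_.toNat ((hget0 s).mpr rfl) hr

-- ===== VERDICT (by name: the statement is the Claim_ definition above) =====
theorem path_exists_bfs_spec : Claim_unchanged_path_exists_bfs := by
  intro matrix start end_ _hdom hpre hnd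
  obtain ⟨_, h1, h2⟩ := hpre
  rw [Bool.eq_iff_iff, pvA_char matrix start end_ h1 h2, pvB_char matrix start end_ h1 h2]
  have hsInt : ((pvIdx matrix.length start : Nat) : Int)
      = if start < 0 then start + (matrix.length : Int) else start := by
    unfold pvIdx
    split <;> omega
  constructor
  · rintro (h | ⟨v, hvn, hvs, hr, hve⟩)
    · exact Or.inl h.symm
    · right
      have hv0 : (0 : Int) ≤ (v : Int) := by omega
      refine ⟨by omega, by omega, ?_⟩
      have : end_.toNat = v := by omega
      rw [this]
      exact hr
  · rintro (h | ⟨he0, he1, hr⟩)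
    · exact Or.inl h.symm
    · by_cases hse : end_ = start
      · exact Or.inl hse
      · right
        refine ⟨end_.toNat, by omega, ?_, hr, by omega⟩
        intro hvs
        rw [← hvs] at hsInt
        unfold D_path_exists_bfs at hnd
        by_cases hneg : start < 0
        · rw [if_pos hneg] at hsInt
          exact hnd ⟨h1, hneg, by omega⟩
        · rw [if_neg hneg] at hsInt
          exact hse (by omega)

theorem path_exists_bfs_changed : Claim_changed_path_exists_bfs := by
  unfold Claim_changed_path_exists_bfs; decide

theorem path_exists_bfs_tight : Claim_exact_path_exists_bfs := by
  intro matrix start end_ _hdom hpre hD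
  obtain ⟨_, h1, h2⟩ := hpre
  obtain ⟨hd1, hd2, hd3⟩ := hD
  have hn1 : 1 ≤ matrix.length := by omega
  have hsInt : ((pvIdx matrix.length start : Nat) : Int) = start + (matrix.length : Int) := by
    unfold pvIdx
    rw [if_pos hd2]
    omega
  have hB : path_exists_bfs_alt matrix start end_ = true := by
    rw [pvB_char matrix start end_ h1 h2]
    right
    refine ⟨by omega, by omega, ?_⟩
    have : end_.toNat = pvIdx matrix.length start := by omega
    rw [this]
    exact Relation.ReflTransGen.refl
  have hA : path_exists_bfs matrix start end_ = false := by
    rw [← Bool.not_eq_true, pvA_char matrix start end_ h1 h2]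
    rintro (h | ⟨v, hvn, hvs, hr, hve⟩)
    · omega
    · exact hvs (by omega)
  rw [hA, hB]
  simp
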